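-- pv_equiv track=rewrite | github.com/MatejCreator/work_folder | Sorting Algo Race.py | worst_of_all
-- ===== SOURCE A (Python) =====
-- from typing import Any, Generator
-- from math import log2, factorial
--
-- def worst_of_all(n: int) -> Generator[list[int], None, None]:
--     arr = [1 for _ in range(n)]
--     yield arr[:]
--
--     for i in range(1, len(arr)):
--         arr[i] = factorial(i)
--         for j in range(i + 1, len(arr)):
--             arr[j] = arr[i]
--         yield arr[:]
-- ===== SOURCE B (Python) =====
-- def worst_of_all(n: int):
--     # Each yielded array is computed independently from the closed form
--     # row_j[k] = factorial(min(k, j)), via a running product -- no shared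
--     # mutable array, no redundant trailing-fill loop.
--     rows = n if n >= 1 else 1
--     for j in range(rows):
--         row = []
--         f = 1
--         for k in range(n):
--             if 1 <= k <= j:
--                 f *= k
--             row.append(f)
--         yield row
-- ===== Notes on version B (the rewrite author's own statement) =====
-- stated objective: alternative
-- what changed: Each yielded array is computed independently from the closed form row_j[k] = factorial(min(k,j)) with a running product, instead of maintaining one mutable array with an inner trailing-fill loop that overwrites slots i+1..n-1 on every step.
import Mathlib
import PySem

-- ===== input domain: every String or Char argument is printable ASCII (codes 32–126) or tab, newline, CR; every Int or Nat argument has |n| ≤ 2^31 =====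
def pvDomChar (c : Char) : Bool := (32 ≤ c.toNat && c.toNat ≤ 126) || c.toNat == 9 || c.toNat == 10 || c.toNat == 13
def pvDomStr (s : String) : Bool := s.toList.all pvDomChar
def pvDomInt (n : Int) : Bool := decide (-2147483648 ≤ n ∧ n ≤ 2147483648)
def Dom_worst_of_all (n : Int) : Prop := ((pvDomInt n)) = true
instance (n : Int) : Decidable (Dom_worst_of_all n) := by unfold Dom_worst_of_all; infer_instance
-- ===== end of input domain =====

-- B computes every yielded array independently from the closed form factorial(min(k, j));
-- A mutates one shared array with an inner trailing-fill loop. Equivalence is about the full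
-- sequence of yielded lists (the generators are ported as the list of all yields).

-- ===== PORT A =====
-- math.factorial (exact for the nonnegative arguments A passes it)
def pyFact (i : Int) : Int := (Nat.factorial i.toNat : Int)

-- inner loop body: arr[j] = arr[i]
def aInner (i : Int) (a : List Int) (j : Int) : List Int :=
  PySem.List.pySetD a j (PySem.List.pyGetD a i 0)

-- outer loop body: arr[i] = factorial(i); for j in range(i+1, len(arr)): arr[j] = arr[i]; yield arr[:]
def aStep (st : List Int × List (List Int)) (i : Int) : List Int × List (List Int) :=
  let a1 := PySem.List.pySetD st.1 i (pyFact i)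
  let a2 := (PySem.List.pyRange (i + 1) (a1.length : Int) 1).foldl (aInner i) a1
  (a2, st.2 ++ [a2])

def worst_of_all (n : Int) : List (List Int) :=
  let arr := (PySem.List.pyRange 0 n 1).map (fun _ => (1 : Int))
  let st := (PySem.List.pyRange 1 (arr.length : Int) 1).foldl aStep (arr, [arr])
  st.2

-- ===== PORT B =====
-- inner loop body of B: maybe multiply the running product, append it
def bStep (j : Int) (st : List Int × Int) (k : Int) : List Int × Int :=
  let f := if 1 ≤ k ∧ k ≤ j then st.2 * k else st.2
  (st.1 ++ [f], f)

def worst_of_all_alt (n : Int) : List (List Int) :=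
  (PySem.List.pyRange 0 (if 1 ≤ n then n else 1) 1).map (fun j =>
    ((PySem.List.pyRange 0 n 1).foldl (bStep j) ([], 1)).1)

-- ===== PRECONDITION & SPEC =====
def Spec_worst_of_all (n : Int) (out : List (List Int)) : Prop := out = worst_of_all_alt n
instance (n : Int) (out : List (List Int)) : Decidable (Spec_worst_of_all n out) := by unfold Spec_worst_of_all; infer_instance

-- ===== CLAIM (what is proved, stated in full; the proofs are below) =====
def Claim_equal_worst_of_all : Prop := ∀ (n : Int), Dom_worst_of_all n → Spec_worst_of_all n (worst_of_all n)

-- ===== LEMMAS AND PROOFS =====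

-- the canonical array A holds after processing outer index i: arr[k] = factorial(min(k, i))
def arrState (N : Nat) (i : Int) : List Int :=
  (List.range N).map (fun (k : Nat) => pyFact (min (k : Int) i))

lemma pyFact_nonpos (i : Int) (h : i ≤ 0) : pyFact i = 1 := by
  unfold pyFact
  rw [Int.toNat_of_nonpos h]
  rfl

lemma fact_min_succ (j : Int) (N : Nat) :
    (if 1 ≤ (N : Int) ∧ (N : Int) ≤ j then pyFact (min ((N : Int) - 1) j) * N
     else pyFact (min ((N : Int) - 1) j)) = pyFact (min (N : Int) j) := by
  split_ifs with h
  · obtain ⟨h1, h2⟩ := h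
    have hmin1 : min ((N : Int) - 1) j = (N : Int) - 1 := by omega
    have hmin2 : min (N : Int) j = (N : Int) := by omega
    rw [hmin1, hmin2]
    obtain ⟨m, rfl⟩ : ∃ m : Nat, N = m + 1 := ⟨N - 1, by omega⟩
    unfold pyFact
    have e1 : (((m : Int) + 1 - 1)).toNat = m := by omega
    push_cast
    rw [e1]
    have e2 : ((m : Int) + 1).toNat = m + 1 := by omega
    rw [e2, Nat.factorial_succ]
    push_cast
    ring
  · rcases Nat.eq_zero_or_pos N with hN | hN
    · subst hN
      simp only [Nat.cast_zero, zero_sub]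
      rw [pyFact_nonpos _ (by omega), pyFact_nonpos _ (by omega)]
    · have hj : j < (N : Int) := by omega
      have hmin1 : min ((N : Int) - 1) j = j := by omega
      have hmin2 : min (N : Int) j = j := by omega
      rw [hmin1, hmin2]

lemma pyRange_zero_toNat (n : Int) :
    PySem.List.pyRange 0 n 1 = PySem.List.pyRange 0 ((n.toNat : Int)) 1 := by
  by_cases h : 0 ≤ n
  · rw [Int.toNat_of_nonneg h]
  · rw [PySem.List.pyRange_one_eq_nil (by omega), PySem.List.pyRange_one_eq_nil (by omega)]

lemma rowB (j : Int) : ∀ (N : Nat),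
    (PySem.List.pyRange 0 (N : Int) 1).foldl (bStep j) ([], 1)
      = ((List.range N).map (fun (k : Nat) => pyFact (min (k : Int) j)),
         pyFact (min ((N : Int) - 1) j)) := by
  intro N
  induction N with
  | zero =>
      rw [PySem.List.pyRange_one_eq_nil (by omega)]
      simp [pyFact_nonpos _ (show min (-1 : Int) j ≤ 0 by omega)]
  | succ N ih =>
      have hc : ((N + 1 : Nat) : Int) = (N : Int) + 1 := by push_cast; ring
      rw [hc, PySem.List.pyRange_one_succ_right (by omega), List.foldl_append, ih]
      simp only [List.foldl_cons, List.foldl_nil, bStep]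
      rw [fact_min_succ j N, Prod.mk.injEq]
      constructor
      · rw [List.range_succ, List.map_append]
        rfl
      · congr 1
        omega

lemma set_map_range (N : Nat) (f : Nat → Int) (jj : Nat) (v : Int) :
    ((List.range N).map f).set jj v
      = (List.range N).map (fun (k : Nat) => if k = jj then v else f k) := by
  apply List.ext_getElem (by simp)
  intro k h1 h2
  simp only [List.getElem_set, List.getElem_map, List.getElem_range]
  by_cases h : jj = k
  · subst h
    simp
  · rw [if_neg h, if_neg (fun hh : k = jj => h hh.symm)]

-- intermediate array during the inner fill loop: entries below m already updated to round i
def mix (N : Nat) (i m : Int) : List Int :=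
  (List.range N).map (fun (k : Nat) =>
    if (k : Int) < m then pyFact (min (k : Int) i) else pyFact (min (k : Int) (i - 1)))

lemma aInner_mix (N : Nat) (i m : Int) (hi : 1 ≤ i) (him : i < m) (hm : m < (N : Int)) :
    aInner i (mix N i m) m = mix N i (m + 1) := by
  unfold aInner mix
  have hget : PySem.List.pyGetD ((List.range N).map (fun (k : Nat) =>
      if (k : Int) < m then pyFact (min (k : Int) i) else pyFact (min (k : Int) (i - 1)))) i 0
      = pyFact i := by
    rw [PySem.List.pyGetD_eq_getElem _ _ (by omega) (by simp; omega)]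
    simp only [List.getElem_map, List.getElem_range]
    have h1 : ((i.toNat : Int)) = i := by omega
    rw [h1, if_pos (by omega), min_self]
  rw [hget, PySem.List.pySetD_of_nonneg _ _ (by omega), set_map_range]
  apply List.map_congr_left
  intro k hk
  simp only [List.mem_range] at hk
  by_cases hke : k = m.toNat
  · have hki : (k : Int) = m := by omega
    rw [if_pos hke, hki, if_pos (by omega)]
    have : min m i = i := by omega
    rw [this]
  · have hne : (k : Int) ≠ m := by omega
    rw [if_neg hke]
    by_cases hlt : (k : Int) < m
    · rw [if_pos hlt, if_pos (by omega)]
    · rw [if_neg hlt, if_neg (by omega)]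

lemma innerFold (N : Nat) (i : Int) (hi : 1 ≤ i) : ∀ (t : Nat), i + 1 + (t : Int) ≤ (N : Int) →
    (PySem.List.pyRange (i + 1) (i + 1 + (t : Int)) 1).foldl (aInner i) (mix N i (i + 1))
      = mix N i (i + 1 + (t : Int)) := by
  intro t
  induction t with
  | zero =>
      intro _
      rw [show i + 1 + ((0 : Nat) : Int) = i + 1 by push_cast; ring,
        PySem.List.pyRange_one_eq_nil (by omega)]
      rfl
  | succ t ih =>
      intro ht
      have hc : i + 1 + ((t + 1 : Nat) : Int) = (i + 1 + (t : Int)) + 1 := by push_cast; ring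
      rw [hc, PySem.List.pyRange_one_succ_right (by omega), List.foldl_append,
        ih (by push_cast at ht ⊢; omega)]
      simp only [List.foldl_cons, List.foldl_nil]
      exact aInner_mix N i _ hi (by omega) (by push_cast at ht; omega)

lemma aStep_arr (N : Nat) (i : Int) (outs : List (List Int)) (h1 : 1 ≤ i) (h2 : i < (N : Int)) :
    aStep (arrState N (i - 1), outs) i = (arrState N i, outs ++ [arrState N i]) := by
  simp only [aStep, arrState]
  have hset : PySem.List.pySetD ((List.range N).map (fun (k : Nat) => pyFact (min (k : Int) (i - 1)))) i (pyFact i)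
      = mix N i (i + 1) := by
    rw [PySem.List.pySetD_of_nonneg _ _ (by omega), set_map_range]
    unfold mix
    apply List.map_congr_left
    intro k hk
    simp only [List.mem_range] at hk
    by_cases hke : k = i.toNat
    · have hki : (k : Int) = i := by omega
      rw [if_pos hke, hki, if_pos (by omega), min_self]
    · have hne : (k : Int) ≠ i := by omega
      rw [if_neg hke]
      by_cases hlt : (k : Int) < i + 1
      · rw [if_pos hlt]
        have e1 : min (k : Int) i = (k : Int) := by omega
        have e2 : min (k : Int) (i - 1) = (k : Int) := by omega
        rw [e1, e2]
      · rw [if_neg hlt]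
  rw [hset]
  have hlen : (mix N i (i + 1)).length = N := by unfold mix; simp
  have ht : i + 1 + (((N : Int) - i - 1).toNat : Int) = (N : Int) := by omega
  have hfold : (PySem.List.pyRange (i + 1) ((mix N i (i + 1)).length : Int) 1).foldl
      (aInner i) (mix N i (i + 1)) = mix N i (N : Int) := by
    rw [hlen, ← ht]
    exact innerFold N i h1 _ (by omega)
  have hmixN : mix N i (N : Int) = (List.range N).map (fun (k : Nat) => pyFact (min (k : Int) i)) := by
    unfold mix
    apply List.map_congr_left
    intro k hk
    simp only [List.mem_range] at hk
    rw [if_pos (by omega)]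
  rw [hfold, hmixN]

lemma outerFold (N : Nat) : ∀ (m : Nat), m ≤ N →
    (PySem.List.pyRange 1 (m : Int) 1).foldl aStep (arrState N 0, [arrState N 0])
      = (arrState N (max ((m : Int) - 1) 0),
         (List.range (max m 1)).map (fun (j : Nat) => arrState N (j : Int))) := by
  intro m
  induction m with
  | zero =>
      intro _
      rw [PySem.List.pyRange_one_eq_nil (by omega)]
      simp [List.range_succ]
  | succ m ih =>
      intro hm
      rcases Nat.eq_zero_or_pos m with hm0 | hm0
      · subst hm0
        rw [PySem.List.pyRange_one_eq_nil (by norm_num)]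
        simp [List.range_succ]
      · have hc : ((m + 1 : Nat) : Int) = (m : Int) + 1 := by push_cast; ring
        rw [hc, PySem.List.pyRange_one_succ_right (by omega), List.foldl_append,
          ih (by omega)]
        simp only [List.foldl_cons, List.foldl_nil]
        have hmax : max ((m : Int) - 1) 0 = (m : Int) - 1 := by omega
        rw [hmax, aStep_arr N (m : Int) _ (by omega) (by omega), Prod.mk.injEq]
        constructor
        · congr 1
          omega
        · have e1 : max m 1 = m := by omega
          have e2 : max (m + 1) 1 = m + 1 := by omega
          rw [e1, e2, List.range_succ, List.map_append]
          rfl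

lemma arr_init (n : Int) :
    (PySem.List.pyRange 0 n 1).map (fun _ => (1 : Int)) = arrState n.toNat 0 := by
  rw [PySem.List.pyRange_one, List.map_map]
  unfold arrState
  rw [show (n - 0).toNat = n.toNat by omega]
  apply List.map_congr_left
  intro k hk
  simp only [List.mem_range] at hk
  simp only [Function.comp_apply]
  rw [show min ((k : Int)) 0 = 0 by omega]
  rfl

-- ===== VERDICT (by name: the statement is the Claim_ definition above) =====
theorem worst_of_all_spec : Claim_equal_worst_of_all := by
  intro n _
  unfold Spec_worst_of_all
  show worst_of_all n = worst_of_all_alt n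
  simp only [worst_of_all, worst_of_all_alt, arr_init n]
  have hlen : (arrState n.toNat 0).length = n.toNat := by unfold arrState; simp
  rw [hlen, outerFold n.toNat n.toNat (le_refl _)]
  have hrow : ∀ j : Int,
      ((PySem.List.pyRange 0 n 1).foldl (bStep j) ([], 1)).1
        = arrState n.toNat j := by
    intro j
    rw [pyRange_zero_toNat, rowB j n.toNat]
    rfl
  simp only [hrow]
  have hM : ((if 1 ≤ n then n else 1) - 0).toNat = max n.toNat 1 := by
    split_ifs with h <;> omega
  rw [PySem.List.pyRange_one, List.map_map, hM]
  apply List.map_congr_left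
  intro k _
  simp only [Function.comp_apply, zero_add]
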